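-- pv_equiv track=rewrite | github.com/m-ahsan-nazer/aoc2021 | day10.py | get_completion_score
-- ===== SOURCE A (Python) =====
-- def get_completion_score(s: str) -> int:
--     score = 0
--     for c in s:
--         if c == ")":
--             score = score * 5 + 1
--         elif c == "]":
--             score = score * 5 + 2
--         elif c == "}":
--             score = score * 5 + 3
--         elif c == ">":
--             score = score * 5 + 4
--     return score
-- ===== SOURCE B (Python) =====
-- def get_completion_score(s: str) -> int:
--     mapping = {")": 1, "]": 2, "}": 3, ">": 4}
--     vals = [mapping[c] for c in s if c in mapping]
--     n = len(vals)
--     return sum(v * 5 ** (n - 1 - i) for i, v in enumerate(vals))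
-- ===== Notes on version B (the rewrite author's own statement) =====
-- stated objective: alternative
-- what changed: Replaces Horner accumulation (score = score*5 + digit per character) by first extracting the bracket digit list and then summing each digit times an explicit positional power of 5.
import Mathlib
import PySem

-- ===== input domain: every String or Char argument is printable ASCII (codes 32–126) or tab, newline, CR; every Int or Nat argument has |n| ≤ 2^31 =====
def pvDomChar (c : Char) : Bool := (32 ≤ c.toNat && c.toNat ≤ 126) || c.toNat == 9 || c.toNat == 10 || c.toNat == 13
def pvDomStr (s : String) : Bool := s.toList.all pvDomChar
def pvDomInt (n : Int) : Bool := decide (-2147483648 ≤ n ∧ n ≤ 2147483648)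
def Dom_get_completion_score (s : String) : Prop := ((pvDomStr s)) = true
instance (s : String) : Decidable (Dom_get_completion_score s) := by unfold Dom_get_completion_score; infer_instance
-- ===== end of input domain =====

-- B replaces A's Horner accumulation by extracting the bracket digits and summing them with explicit positional powers of 5 (alternative decomposition, same cost).


-- ===== PORT A =====
def get_completion_score (s : String) : Int :=
  s.toList.foldl (fun score c =>
    if c = ')' then score * 5 + 1
    else if c = ']' then score * 5 + 2
    else if c = '}' then score * 5 + 3
    else if c = '>' then score * 5 + 4
    else score) 0

-- ===== PORT B =====
-- mapping lookup: returns the digit for a closing bracket, none otherwise (c in mapping test + mapping[c])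
def pvBracketVal? (c : Char) : Option Int :=
  if c = ')' then some 1
  else if c = ']' then some 2
  else if c = '}' then some 3
  else if c = '>' then some 4
  else none

def get_completion_score_alt (s : String) : Int :=
  let vals := s.toList.filterMap pvBracketVal?
  let n : Int := vals.length
  ((PySem.List.enumerate vals).map (fun iv => iv.2 * (5 : Int) ^ (n - 1 - iv.1).toNat)).sum

-- ===== PRECONDITION & SPEC =====
def Spec_get_completion_score (s : String) (out : Int) : Prop := out = get_completion_score_alt s
instance (s : String) (out : Int) : Decidable (Spec_get_completion_score s out) := by unfold Spec_get_completion_score; infer_instance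

-- ===== CLAIM (what is proved, stated in full; the proofs are below) =====
def Claim_equal_get_completion_score : Prop := ∀ (s : String), Dom_get_completion_score s → Spec_get_completion_score s (get_completion_score s)

-- ===== LEMMAS AND PROOFS =====

-- positional sum of a digit list, as B computes it
def pvPsum (d : List Int) : Int :=
  ((PySem.List.enumerate d).map (fun iv => iv.2 * (5 : Int) ^ ((d.length : Int) - 1 - iv.1).toNat)).sum

theorem pv_map_enumerate_shift (d : List Int) (s : Int) (f g : Int × Int → Int)
    (h : ∀ i v, f (i + 1, v) = g (i, v)) :
    (PySem.List.enumerate d (s + 1)).map f = (PySem.List.enumerate d s).map g := by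
  induction d generalizing s with
  | nil => simp [PySem.List.enumerate_nil]
  | cons v t ih =>
    simp only [PySem.List.enumerate_cons, List.map_cons]
    rw [show s + 1 + 1 = (s + 1) + 1 by ring, ih (s + 1)]
    congr 1
    have := h s v
    simpa using this

theorem pvPsum_cons (v : Int) (d : List Int) :
    pvPsum (v :: d) = v * (5 : Int) ^ d.length + pvPsum d := by
  unfold pvPsum
  simp only [PySem.List.enumerate_cons, List.map_cons, List.sum_cons, List.length_cons]
  push_cast
  have hshift :
      (PySem.List.enumerate d 1).map
        (fun iv => iv.2 * (5 : Int) ^ (((d.length : Int) + 1) - 1 - iv.1).toNat) =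
      (PySem.List.enumerate d 0).map
        (fun iv => iv.2 * (5 : Int) ^ ((d.length : Int) - 1 - iv.1).toNat) := by
    rw [show (1 : Int) = 0 + 1 from by ring]
    apply pv_map_enumerate_shift
    intro i w
    simp only []
    congr 2
    omega
  rw [hshift]
  congr 1
  have h0 : ((d.length : Int) + 1 - 1 - 0).toNat = d.length := by omega
  rw [h0]

-- the digit list B extracts
def pvVals (l : List Char) : List Int := l.filterMap pvBracketVal?

theorem pv_foldl_eq_vals (l : List Char) (a : Int) :
    l.foldl (fun score c =>
      if c = ')' then score * 5 + 1
      else if c = ']' then score * 5 + 2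
      else if c = '}' then score * 5 + 3
      else if c = '>' then score * 5 + 4
      else score) a
      = (pvVals l).foldl (fun score v => score * 5 + v) a := by
  induction l generalizing a with
  | nil => simp [pvVals]
  | cons c t ih =>
    by_cases h1 : c = ')'
    · simp [pvVals, pvBracketVal?, h1, ih]
    · by_cases h2 : c = ']'
      · simp [pvVals, pvBracketVal?, h2, ih]
      · by_cases h3 : c = '}'
        · simp [pvVals, pvBracketVal?, h3, ih]
        · by_cases h4 : c = '>'
          · simp [pvVals, pvBracketVal?, h4, ih]
          · simp [pvVals, pvBracketVal?, h1, h2, h3, h4, ih]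

theorem pv_horner_eq_psum (d : List Int) (a : Int) :
    d.foldl (fun score v => score * 5 + v) a = a * (5 : Int) ^ d.length + pvPsum d := by
  induction d generalizing a with
  | nil => simp [pvPsum, PySem.List.enumerate_nil]
  | cons v t ih =>
    simp only [List.foldl_cons, List.length_cons, pvPsum_cons]
    rw [ih (a * 5 + v)]
    ring

-- ===== VERDICT (by name: the statement is the Claim_ definition above) =====
theorem get_completion_score_spec : Claim_equal_get_completion_score := by
  intro s _
  unfold Spec_get_completion_score get_completion_score get_completion_score_alt
  rw [pv_foldl_eq_vals, pv_horner_eq_psum]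
  simp [pvVals, pvPsum]
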